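-- pv_equiv track=rewrite | github.com/willcucco/CS0-wjcucco | lists/fallingapart.py | answer
-- ===== SOURCE A (Python) =====
-- def answer(PieceValue):
--     alice = 0
--     bob = 0
--     while PieceValue:
--         alice += max(PieceValue)
--         PieceValue.remove(max(PieceValue))
--         if PieceValue:
--             bob += max(PieceValue)
--             PieceValue.remove(max(PieceValue))
--
--     return alice, bob
-- ===== SOURCE B (Python) =====
-- def answer(PieceValue):
--     # Sort once descending, then one pass: even positions to alice, odd to bob.
--     # Return-value equivalence only: A empties its argument list in place, B does not mutate it.
--     alice = 0
--     bob = 0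
--     for i, v in enumerate(sorted(PieceValue, reverse=True)):
--         if i % 2 == 0:
--             alice += v
--         else:
--             bob += v
--     return alice, bob
-- ===== Notes on version B (the rewrite author's own statement) =====
-- stated objective: faster
-- what changed: Replaces A's repeated max()+remove() scans of a shrinking list with one descending sort followed by a single pass that adds even-position values to alice and odd-position values to bob.
import Mathlib
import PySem

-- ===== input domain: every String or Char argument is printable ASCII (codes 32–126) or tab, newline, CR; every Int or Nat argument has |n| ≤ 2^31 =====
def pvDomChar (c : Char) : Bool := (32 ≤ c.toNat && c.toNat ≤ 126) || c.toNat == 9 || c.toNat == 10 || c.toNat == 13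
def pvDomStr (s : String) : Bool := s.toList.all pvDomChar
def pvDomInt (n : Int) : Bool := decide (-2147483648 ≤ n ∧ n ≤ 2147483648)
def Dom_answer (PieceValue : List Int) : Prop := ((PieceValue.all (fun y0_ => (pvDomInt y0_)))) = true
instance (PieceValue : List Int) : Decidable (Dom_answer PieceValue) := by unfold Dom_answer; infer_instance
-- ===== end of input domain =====

-- B sorts once (descending) and makes one alternating pass instead of A's repeated max+remove scans; return-value equivalence only (Python A empties its argument list in place, B does not mutate it).


-- ===== PORT A =====
-- while PieceValue: alice += max(...); remove(max); if PieceValue: bob += max(...); remove(max)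
def answerGo (l : List Int) (alice bob : Int) : Int × Int :=
  match hm : PySem.List.max? l (fun x => x) with
  | none => (alice, bob)
  | some m =>
    match hm2 : PySem.List.max? ((PySem.List.remove? l m).getD l) (fun x => x) with
    | none => (alice + m, bob)
    | some m2 =>
      answerGo ((PySem.List.remove? ((PySem.List.remove? l m).getD l) m2).getD ((PySem.List.remove? l m).getD l))
        (alice + m) (bob + m2)
termination_by l.length
decreasing_by
  have h1 : m ∈ l := PySem.List.max?_mem hm
  have e1 : (PySem.List.remove? l m).getD l = l.erase m := by
    rw [PySem.List.remove?_eq_some_erase l m h1]; rfl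
  have h2 : m2 ∈ l.erase m := by rw [e1] at hm2; exact PySem.List.max?_mem hm2
  rw [e1, PySem.List.remove?_eq_some_erase (l.erase m) m2 h2]
  simp only [Option.getD_some]
  have hl1 : (l.erase m).length = l.length - 1 := List.length_erase_of_mem h1
  have hl2 : ((l.erase m).erase m2).length = (l.erase m).length - 1 := List.length_erase_of_mem h2
  have : 0 < (l.erase m).length := List.length_pos_of_mem h2
  omega

def answer (PieceValue : List Int) : Int × Int := answerGo PieceValue 0 0

-- ===== PORT B =====
def answer_alt (PieceValue : List Int) : Int × Int :=
  (PySem.List.enumerate (PySem.List.sorted PieceValue (fun x => x) true) 0).foldl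
    (fun ab iv => if PySem.Int.mod iv.1 2 = 0 then (ab.1 + iv.2, ab.2) else (ab.1, ab.2 + iv.2))
    (0, 0)

-- ===== PRECONDITION & SPEC =====
def Spec_answer (PieceValue : List Int) (out : Int × Int) : Prop := out = answer_alt PieceValue
instance (PieceValue : List Int) (out : Int × Int) : Decidable (Spec_answer PieceValue out) := by unfold Spec_answer; infer_instance

-- ===== CLAIM (what is proved, stated in full; the proofs are below) =====
def Claim_equal_answer : Prop := ∀ (PieceValue : List Int), Dom_answer PieceValue → Spec_answer PieceValue (answer PieceValue)

-- ===== LEMMAS AND PROOFS =====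

-- alternating sums of a list: esum = even positions, osum = odd positions
mutual
def esum : List Int → Int
  | [] => 0
  | x :: t => x + osum t
def osum : List Int → Int
  | [] => 0
  | _ :: t => esum t
end

-- descending sort, abbreviated
def sd (l : List Int) : List Int := PySem.List.sorted l (fun x => x) true

theorem sd_cons {l : List Int} {m : Int} (hm : PySem.List.max? l (fun x => x) = some m) :
    sd l = m :: sd (l.erase m) := by
  have h1 : m ∈ l := PySem.List.max?_mem hm
  refine List.Perm.eq_of_pairwise (le := fun a b : Int => b ≤ a)
    (fun a b _ _ hab hba => le_antisymm hba hab) ?_ ?_ ?_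
  · exact PySem.List.sorted_pairwise_rev l _
  · refine List.Pairwise.cons ?_ (PySem.List.sorted_pairwise_rev _ _)
    intro y hy
    have : y ∈ l.erase m := (PySem.List.mem_sorted _ _ _ _).mp hy
    exact PySem.List.max?_isMax hm y (List.mem_of_mem_erase this)
  · exact ((PySem.List.sorted_perm l _ _).trans (List.perm_cons_erase h1)).trans
      (List.Perm.cons m (PySem.List.sorted_perm _ _ _).symm)

-- the alternating fold of B, over any even/odd start index
theorem foldB (s : List Int) : ∀ (n : Nat) (a b : Int),
    ((PySem.List.enumerate s ((2 * n : Nat) : Int)).foldl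
      (fun ab iv => if PySem.Int.mod iv.1 2 = 0 then (ab.1 + iv.2, ab.2) else (ab.1, ab.2 + iv.2))
      (a, b) = (a + esum s, b + osum s))
    ∧ ((PySem.List.enumerate s ((2 * n + 1 : Nat) : Int)).foldl
      (fun ab iv => if PySem.Int.mod iv.1 2 = 0 then (ab.1 + iv.2, ab.2) else (ab.1, ab.2 + iv.2))
      (a, b) = (a + osum s, b + esum s)) := by
  induction s with
  | nil => intro n a b; simp [PySem.List.enumerate, esum, osum]
  | cons x t ih =>
    intro n a b
    constructor
    · rw [PySem.List.enumerate_cons]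
      simp only [List.foldl_cons]
      have hmod : PySem.Int.mod ((2 * n : Nat) : Int) 2 = 0 := by
        exact (PySem.Int.mod_eq_zero_iff_dvd _ 2).mpr ⟨(n : Int), by push_cast; ring⟩
      rw [if_pos hmod]
      have : ((2 * n : Nat) : Int) + 1 = ((2 * n + 1 : Nat) : Int) := by push_cast; ring
      rw [this]
      rw [(ih n (a + x) b).2]
      simp [esum, osum]; ring
    · rw [PySem.List.enumerate_cons]
      simp only [List.foldl_cons]
      have hmod : ¬ PySem.Int.mod ((2 * n + 1 : Nat) : Int) 2 = 0 := by
        intro h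
        rcases (PySem.Int.mod_eq_zero_iff_dvd _ 2).mp h with ⟨k, hk⟩
        omega
      rw [if_neg hmod]
      have : ((2 * n + 1 : Nat) : Int) + 1 = ((2 * (n + 1) : Nat) : Int) := by push_cast; ring
      rw [this]
      rw [(ih (n + 1) a (b + x)).1]
      simp [esum, osum]; ring

theorem answer_alt_eq (l : List Int) : answer_alt l = (esum (sd l), osum (sd l)) := by
  have h := (foldB (sd l) 0 0 0).1
  simpa [answer_alt, sd] using h

theorem answerGo_eq : ∀ (n : Nat) (l : List Int), l.length ≤ n → ∀ (a b : Int),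
    answerGo l a b = (a + esum (sd l), b + osum (sd l)) := by
  intro n
  induction n with
  | zero =>
    intro l hl a b
    have hl0 : l = [] := List.length_eq_zero_iff.mp (Nat.le_zero.mp hl)
    subst hl0
    have hnil : sd ([] : List Int) = [] := (PySem.List.sorted_eq_nil_iff _ _ _).mpr rfl
    rw [answerGo.eq_def]
    split
    · simp [hnil, esum, osum]
    · next m hm => exact absurd (PySem.List.max?_mem hm) (List.not_mem_nil)
  | succ n ih =>
    intro l hl a b
    rw [answerGo.eq_def]
    split
    · next hm =>
      have hl0 : l = [] := (PySem.List.max?_eq_none_iff _ _).mp hm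
      subst hl0
      have hnil : sd ([] : List Int) = [] := (PySem.List.sorted_eq_nil_iff _ _ _).mpr rfl
      simp [hnil, esum, osum]
    · next m hm =>
      have h1 : m ∈ l := PySem.List.max?_mem hm
      have e1 : (PySem.List.remove? l m).getD l = l.erase m := by
        rw [PySem.List.remove?_eq_some_erase l m h1]; rfl
      rw [e1]
      split
      · next hm2 =>
        have he : l.erase m = [] := (PySem.List.max?_eq_none_iff _ _).mp hm2
        rw [sd_cons hm, he]
        have hnil : sd ([] : List Int) = [] := (PySem.List.sorted_eq_nil_iff _ _ _).mpr rfl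
        simp [hnil, esum, osum]
      · next m2 hm2 =>
        have h2 : m2 ∈ l.erase m := PySem.List.max?_mem hm2
        have e2 : (PySem.List.remove? (l.erase m) m2).getD (l.erase m) = (l.erase m).erase m2 := by
          rw [PySem.List.remove?_eq_some_erase (l.erase m) m2 h2]; rfl
        rw [e2]
        have hlen : ((l.erase m).erase m2).length ≤ n := by
          have hl1 : (l.erase m).length = l.length - 1 := List.length_erase_of_mem h1
          have hl2 : ((l.erase m).erase m2).length = (l.erase m).length - 1 := List.length_erase_of_mem h2
          have : 0 < (l.erase m).length := List.length_pos_of_mem h2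
          omega
        rw [ih _ hlen]
        rw [sd_cons hm, sd_cons hm2]
        simp [esum, osum]; constructor <;> ring

-- ===== VERDICT (by name: the statement is the Claim_ definition above) =====
theorem answer_spec : Claim_equal_answer := by
  intro l _
  unfold Spec_answer answer
  rw [answerGo_eq l.length l le_rfl, answer_alt_eq]
  simp
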